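-- pv_equiv track=rewrite | github.com/Arsen1302/Code-copy-detector | TestData/solutions/problem_696_5.py | solution_696_5
-- ===== SOURCE A (Python) =====
-- def solution_696_5(s: str, n: int) -> bool:
--     leng_s = len(s)
--     for i in range(1,n+1):
--         binary = str(bin(i)[2:])
--         leng_b = len(binary)
--         flag = False
--         for j in range(leng_s - leng_b + 1):
--             if s[j:j + leng_b] == binary:
--                 flag = True
--                 break
--         if flag == False:return False
--     return True
-- ===== SOURCE B (Python) =====
-- def solution_696_5(s: str, n: int) -> bool:
--     # Alternative strategy: one pass over s: collect every integer value whose binary form (no leading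
--     # zeros, length at most that of bin(n)) occurs as a substring of s, then
--     # check the whole range 1..n against that set.
--     if n <= 0:
--         return True
--     maxlen = len(bin(n)) - 2
--     seen = set()
--     for j in range(len(s)):
--         if s[j] == '1':
--             v = 1
--             seen.add(v)
--             for k in range(j + 1, min(j + maxlen, len(s))):
--                 c = s[k]
--                 if c == '0':
--                     v = 2 * v
--                 elif c == '1':
--                     v = 2 * v + 1
--                 else:
--                     break
--                 seen.add(v)
--     return all(i in seen for i in range(1, n + 1))
-- ===== Notes on version B (the rewrite author's own statement) =====
-- stated objective: alternative
-- what changed: Instead of rescanning s for the binary string of each i in 1..n (a fresh substring scan per target), B makes one pass over s collecting into a set every integer whose no-leading-zero binary form (length bounded by len(bin(n))) occurs as a substring, then checks the range 1..n against that set; intended as faster (it trades A's per-target rescans for one indexing pass, measured ~2.2x on large random inputs but slower when A exits on the first missing target), recorded here as alternative since a timing run could not confirm it consistently.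
import Mathlib
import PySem

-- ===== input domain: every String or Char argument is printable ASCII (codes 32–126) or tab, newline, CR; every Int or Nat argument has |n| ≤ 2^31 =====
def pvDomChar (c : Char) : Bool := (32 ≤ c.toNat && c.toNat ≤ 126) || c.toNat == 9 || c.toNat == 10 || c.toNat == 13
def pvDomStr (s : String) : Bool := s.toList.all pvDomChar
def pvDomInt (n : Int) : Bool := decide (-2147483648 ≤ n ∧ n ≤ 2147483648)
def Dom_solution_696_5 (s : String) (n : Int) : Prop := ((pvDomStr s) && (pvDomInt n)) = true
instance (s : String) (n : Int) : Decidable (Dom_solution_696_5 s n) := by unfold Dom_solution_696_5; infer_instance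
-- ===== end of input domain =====

-- B replaces A's per-target rescans of s by one pass that collects all binary substring values into a set,
-- then checks 1..n against that set (objective: alternative one-pass indexing strategy).

-- ===== PORT A =====
-- bin(i)[2:] for i ≥ 1 (helper shared by both ports: both Pythons call bin)
def binChars (i : Int) : List Char :=
  if h : i ≤ 1 then ['1']
  else binChars (PySem.Int.floordiv i 2) ++ [if PySem.Int.mod i 2 = 0 then '0' else '1']
termination_by i.toNat
decreasing_by
  rw [PySem.Int.floordiv_eq_ediv_of_pos (by omega)]
  omega

-- outer loop of A: 'for i in range(1, n+1): ... if flag == False: return False' (early exit,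
-- like Python's lazy range; the inner scan over j keeps its flag/break shape as .any)
def aLoop (cs : List Char) (n : Int) (i : Int) : Bool :=
  if _h : i < n + 1 then
    if ((PySem.List.pyRange 0 ((cs.length : Int) - ((binChars i).length : Int) + 1) 1).any fun j =>
          PySem.List.slice cs (some j) (some (j + ((binChars i).length : Int))) == binChars i) = false
    then false
    else aLoop cs n (i + 1)
  else true
termination_by (n + 1 - i).toNat
decreasing_by omega

def solution_696_5 (s : String) (n : Int) : Bool := aLoop s.toList n 1

-- ===== PORT B =====
-- inner loop: for k in range(j+1, stop): extend v by s[k] ('0'/'1'), adding each value; break otherwise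
def bInner (cs : List Char) (stop : Int) (k : Int) (v : Int) (seen : PySem.Set Int) : PySem.Set Int :=
  if h : k < stop then
    match PySem.List.pyGet? cs k with
    | some c =>
        if c = '0' then bInner cs stop (k + 1) (2 * v) (PySem.Set.add seen (2 * v))
        else if c = '1' then bInner cs stop (k + 1) (2 * v + 1) (PySem.Set.add seen (2 * v + 1))
        else seen
    | none => seen
  else seen
termination_by (stop - k).toNat
decreasing_by all_goals omega

-- B's 'all(i in seen for i in range(1, n+1))': early-exit scan of the lazy range
def bCheck (seen : PySem.Set Int) (n : Int) (i : Int) : Bool :=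
  if _h : i < n + 1 then
    if PySem.Set.contains seen i then bCheck seen n (i + 1) else false
  else true
termination_by (n + 1 - i).toNat
decreasing_by omega

def solution_696_5_alt (s : String) (n : Int) : Bool :=
  if n ≤ 0 then true
  else
    let cs := s.toList
    let maxlen : Int := (binChars n).length
    let seen : PySem.Set Int :=
      (PySem.List.pyRange 0 (cs.length : Int) 1).foldl
        (fun seen j =>
          if PySem.List.pyGet? cs j == some '1' then
            bInner cs (min (j + maxlen) (cs.length : Int)) (j + 1) 1 (PySem.Set.add seen 1)
          else seen)
        []
    bCheck seen n 1

-- ===== PRECONDITION & SPEC =====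
def Spec_solution_696_5 (s : String) (n : Int) (out : Bool) : Prop := out = solution_696_5_alt s n
instance (s : String) (n : Int) (out : Bool) : Decidable (Spec_solution_696_5 s n out) := by unfold Spec_solution_696_5; infer_instance

-- ===== CLAIM (what is proved, stated in full; the proofs are below) =====
def Claim_equal_solution_696_5 : Prop := ∀ (s : String) (n : Int), Dom_solution_696_5 s n → Spec_solution_696_5 s n (solution_696_5 s n)

-- ===== LEMMAS AND PROOFS =====

-- spec-side vocabulary
def extBin (v : Int) (w : List Char) : Int := w.foldl (fun a c => 2 * a + (if c = '1' then 1 else 0)) v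
def winOf (cs : List Char) (j L : Nat) : List Char := (cs.drop j).take L
def AllBin (w : List Char) : Prop := ∀ c ∈ w, c = '0' ∨ c = '1'

theorem binChars_of_le_one {i : Int} (h : i ≤ 1) : binChars i = ['1'] := by
  rw [binChars]; simp [h]

theorem binChars_two_mul {v : Int} (hv : 1 ≤ v) : binChars (2 * v) = binChars v ++ ['0'] := by
  rw [binChars]
  have h1 : ¬ (2 * v ≤ 1) := by omega
  have h2 : PySem.Int.floordiv (2 * v) 2 = v := by
    rw [PySem.Int.floordiv_eq_ediv_of_pos (by omega)]; omega
  have h3 : PySem.Int.mod (2 * v) 2 = 0 := by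
    rw [PySem.Int.mod_eq_emod_of_pos (by omega)]; omega
  rw [dif_neg h1, h2, h3]; norm_num

theorem binChars_two_mul_add_one {v : Int} (hv : 1 ≤ v) :
    binChars (2 * v + 1) = binChars v ++ ['1'] := by
  rw [binChars]
  have h1 : ¬ (2 * v + 1 ≤ 1) := by omega
  have h2 : PySem.Int.floordiv (2 * v + 1) 2 = v := by
    rw [PySem.Int.floordiv_eq_ediv_of_pos (by omega)]; omega
  have h3 : PySem.Int.mod (2 * v + 1) 2 = 1 := by
    rw [PySem.Int.mod_eq_emod_of_pos (by omega)]; omega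
  rw [dif_neg h1, h2, h3]; norm_num

-- shape: binChars i = '1' :: t, all chars binary
theorem halve_facts {i : Int} (h2 : 2 ≤ i) :
    1 ≤ PySem.Int.floordiv i 2 ∧ (PySem.Int.floordiv i 2).toNat < i.toNat ∧
    (PySem.Int.mod i 2 = 0 ∧ i = 2 * PySem.Int.floordiv i 2 ∨
     PySem.Int.mod i 2 = 1 ∧ i = 2 * PySem.Int.floordiv i 2 + 1) := by
  rw [PySem.Int.floordiv_eq_ediv_of_pos (by omega), PySem.Int.mod_eq_emod_of_pos (by omega)]
  omega

theorem binChars_shape {i : Int} (hi : 1 ≤ i) :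
    ∃ t, binChars i = '1' :: t ∧ AllBin (binChars i) := by
  by_cases h : i ≤ 1
  · exact ⟨[], binChars_of_le_one h, by intro c hc; rw [binChars_of_le_one h] at hc; simp_all⟩
  · obtain ⟨hv, hlt, hcase⟩ := halve_facts (i := i) (by omega)
    obtain ⟨t, ht, hall⟩ := binChars_shape (i := PySem.Int.floordiv i 2) hv
    rcases hcase with ⟨_, hev⟩ | ⟨_, hodd⟩
    · refine ⟨t ++ ['0'], ?_, ?_⟩
      · rw [hev, binChars_two_mul hv, ht]; rfl
      · intro c hc; rw [hev, binChars_two_mul hv] at hc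
        rcases List.mem_append.mp hc with h1 | h1
        · exact hall c h1
        · rcases List.mem_singleton.mp h1 with rfl; exact Or.inl rfl
    · refine ⟨t ++ ['1'], ?_, ?_⟩
      · rw [hodd, binChars_two_mul_add_one hv, ht]; rfl
      · intro c hc; rw [hodd, binChars_two_mul_add_one hv] at hc
        rcases List.mem_append.mp hc with h1 | h1
        · exact hall c h1
        · rcases List.mem_singleton.mp h1 with rfl; exact Or.inr rfl
termination_by i.toNat

theorem extBin_append_singleton (v : Int) (w : List Char) (c : Char) :
    extBin v (w ++ [c]) = 2 * extBin v w + (if c = '1' then 1 else 0) := by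
  simp [extBin]

theorem extBin_binChars {i : Int} (hi : 1 ≤ i) : extBin 0 (binChars i) = i := by
  by_cases h : i ≤ 1
  · have : i = 1 := by omega
    subst this; rw [binChars_of_le_one (by omega)]; rfl
  · obtain ⟨hv, hlt, hcase⟩ := halve_facts (i := i) (by omega)
    have ih := extBin_binChars (i := PySem.Int.floordiv i 2) hv
    rcases hcase with ⟨_, hev⟩ | ⟨_, hodd⟩
    · rw [hev, binChars_two_mul hv, extBin_append_singleton, ih, if_neg (by decide)]; omega
    · rw [hodd, binChars_two_mul_add_one hv, extBin_append_singleton, ih, if_pos rfl]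
termination_by i.toNat

theorem le_extBin {v : Int} (hv : 1 ≤ v) (w : List Char) : 1 ≤ extBin v w := by
  induction w generalizing v with
  | nil => exact hv
  | cons c t ih =>
      show 1 ≤ extBin (2 * v + (if c = '1' then 1 else 0)) t
      exact ih (by split_ifs <;> omega)

theorem binChars_extBin {w : List Char} (hw : AllBin w) : binChars (extBin 1 w) = '1' :: w := by
  induction w using List.reverseRecOn with
  | nil => exact binChars_of_le_one (by norm_num [extBin])
  | append_singleton t c ih =>
      have ht : AllBin t := fun x hx => hw x (List.mem_append.mpr (Or.inl hx))
      have hc : c = '0' ∨ c = '1' := hw c (List.mem_append.mpr (Or.inr (by simp)))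
      have h1 : 1 ≤ extBin 1 t := le_extBin le_rfl t
      rw [extBin_append_singleton]
      rcases hc with hc | hc <;> subst hc
      · rw [if_neg (by decide), add_zero, binChars_two_mul h1, ih ht]; rfl
      · rw [if_pos rfl, binChars_two_mul_add_one h1, ih ht]; rfl

theorem length_binChars_halve {m : Int} (h2 : 2 ≤ m) :
    (binChars m).length = (binChars (PySem.Int.floordiv m 2)).length + 1 := by
  obtain ⟨hv, -, hc⟩ := halve_facts h2
  rcases hc with ⟨-, he⟩ | ⟨-, ho⟩
  · conv_lhs => rw [he, binChars_two_mul hv]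
    rw [List.length_append]; rfl
  · conv_lhs => rw [ho, binChars_two_mul_add_one hv]
    rw [List.length_append]; rfl

theorem binChars_length_mono {i n : Int} (hi : 1 ≤ i) (hin : i ≤ n) :
    (binChars i).length ≤ (binChars n).length := by
  by_cases h : i ≤ 1
  · rw [binChars_of_le_one h]
    obtain ⟨t, ht, -⟩ := binChars_shape (i := n) (by omega)
    rw [ht]; simp
  · have hle : PySem.Int.floordiv i 2 ≤ PySem.Int.floordiv n 2 := by
      rw [PySem.Int.floordiv_eq_ediv_of_pos (by omega), PySem.Int.floordiv_eq_ediv_of_pos (by omega)]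
      omega
    obtain ⟨hv', hlt', -⟩ := halve_facts (i := i) (by omega)
    have ih := binChars_length_mono (i := PySem.Int.floordiv i 2) (n := PySem.Int.floordiv n 2) hv' hle
    rw [length_binChars_halve (by omega), length_binChars_halve (m := n) (by omega)]
    omega
termination_by i.toNat
decreasing_by
  · omega


theorem extBin_eq_of_v (v v' : Int) (w : List Char) (h : v = v') : extBin v w = extBin v' w := by
  rw [h]

theorem winOf_cons {cs : List Char} {j : Nat} (h : j < cs.length) (m : Nat) :
    winOf cs j (m + 1) = cs[j] :: winOf cs (j + 1) m := by
  unfold winOf; rw [List.drop_eq_getElem_cons h]; rfl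

theorem length_winOf {cs : List Char} {j L : Nat} (h : j + L ≤ cs.length) :
    (winOf cs j L).length = L := by
  unfold winOf; simp; omega

theorem extBin_cons (v : Int) (c : Char) (w : List Char) :
    extBin v (c :: w) = extBin (2 * v + (if c = '1' then 1 else 0)) w := rfl

theorem mem_bInner (cs : List Char) (stop : Int) (hstop : stop ≤ (cs.length : Int)) :
    ∀ (fuel : Nat) (kn : Nat) (v x : Int) (seen : PySem.Set Int), (stop - kn).toNat = fuel →
    (x ∈ bInner cs stop (kn : Int) v seen ↔
      x ∈ seen ∨ ∃ m : Nat, 1 ≤ m ∧ (kn : Int) + m ≤ stop ∧ AllBin (winOf cs kn m) ∧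
        x = extBin v (winOf cs kn m)) := by
  intro fuel
  induction fuel using Nat.strong_induction_on with
  | _ fuel ih =>
    intro kn v x seen hfuel
    rw [bInner]
    by_cases hks : (kn : Int) < stop
    · rw [dif_pos hks]
      have hkl : kn < cs.length := by omega
      have hget : PySem.List.pyGet? cs (kn : Int) = some cs[kn] := by
        rw [PySem.List.pyGet?_natCast, List.getElem?_eq_getElem hkl]
      simp only [hget]
      have hfu : (stop - ((kn : Int) + 1)).toNat < fuel := by omega
      by_cases h0 : cs[kn] = '0'
      · rw [if_pos h0]
        have hcast : ((kn + 1 : Nat) : Int) = (kn : Int) + 1 := by push_cast; ring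
        rw [← hcast, ih _ (by omega) (kn + 1) (2 * v) x _ (by omega)]
        constructor
        · rintro (hmem | ⟨m, hm1, hmle, hall, hx⟩)
          · rcases (PySem.Set.mem_add seen (2 * v) x).mp hmem with hmem | rfl
            · exact Or.inl hmem
            · refine Or.inr ⟨1, le_rfl, by omega, ?_, ?_⟩
              · rw [winOf_cons hkl 0, h0]; rintro c hc
                rcases List.mem_singleton.mp (by simpa [winOf] using hc) with rfl
                exact Or.inl rfl
              · rw [winOf_cons hkl 0, h0]; show 2 * v = extBin v ['0']
                simp [extBin]
          · refine Or.inr ⟨m + 1, by omega, by push_cast; omega, ?_, ?_⟩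
            · rw [winOf_cons hkl m, h0]
              rintro c hc
              rcases List.mem_cons.mp hc with rfl | hc
              · exact Or.inl rfl
              · exact hall c hc
            · rw [winOf_cons hkl m, h0, extBin_cons]
              rw [hx]; try (apply extBin_eq_of_v; simp)
        · rintro (hmem | ⟨m, hm1, hmle, hall, hx⟩)
          · exact Or.inl ((PySem.Set.mem_add seen (2 * v) x).mpr (Or.inl hmem))
          · obtain ⟨m', rfl⟩ : ∃ m', m = m' + 1 := ⟨m - 1, by omega⟩
            rw [winOf_cons hkl m', h0] at hall hx
            by_cases hm0 : m' = 0
            · subst hm0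
              refine Or.inl ((PySem.Set.mem_add seen (2 * v) x).mpr (Or.inr ?_))
              rw [hx]; simp [extBin, winOf]
            · refine Or.inr ⟨m', by omega, by push_cast at hmle ⊢; omega, ?_, ?_⟩
              · exact fun c hc => hall c (List.mem_cons.mpr (Or.inr hc))
              · rw [hx, extBin_cons]; try (apply extBin_eq_of_v; simp)
      · rw [if_neg h0]
        by_cases h1 : cs[kn] = '1'
        · rw [if_pos h1]
          have hcast : ((kn + 1 : Nat) : Int) = (kn : Int) + 1 := by push_cast; ring
          rw [← hcast, ih _ (by omega) (kn + 1) (2 * v + 1) x _ (by omega)]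
          constructor
          · rintro (hmem | ⟨m, hm1, hmle, hall, hx⟩)
            · rcases (PySem.Set.mem_add seen (2 * v + 1) x).mp hmem with hmem | rfl
              · exact Or.inl hmem
              · refine Or.inr ⟨1, le_rfl, by omega, ?_, ?_⟩
                · rw [winOf_cons hkl 0, h1]; rintro c hc
                  rcases List.mem_singleton.mp (by simpa [winOf] using hc) with rfl
                  exact Or.inr rfl
                · rw [winOf_cons hkl 0, h1]; show 2 * v + 1 = extBin v ['1']
                  simp [extBin]
            · refine Or.inr ⟨m + 1, by omega, by push_cast; omega, ?_, ?_⟩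
              · rw [winOf_cons hkl m, h1]
                rintro c hc
                rcases List.mem_cons.mp hc with rfl | hc
                · exact Or.inr rfl
                · exact hall c hc
              · rw [winOf_cons hkl m, h1, extBin_cons]
                rw [hx]; try (apply extBin_eq_of_v; simp)
          · rintro (hmem | ⟨m, hm1, hmle, hall, hx⟩)
            · exact Or.inl ((PySem.Set.mem_add seen (2 * v + 1) x).mpr (Or.inl hmem))
            · obtain ⟨m', rfl⟩ : ∃ m', m = m' + 1 := ⟨m - 1, by omega⟩
              rw [winOf_cons hkl m', h1] at hall hx
              by_cases hm0 : m' = 0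
              · subst hm0
                refine Or.inl ((PySem.Set.mem_add seen (2 * v + 1) x).mpr (Or.inr ?_))
                rw [hx]; simp [extBin, winOf]
              · refine Or.inr ⟨m', by omega, by push_cast at hmle ⊢; omega, ?_, ?_⟩
                · exact fun c hc => hall c (List.mem_cons.mpr (Or.inr hc))
                · rw [hx, extBin_cons]; try (apply extBin_eq_of_v; simp)
        · rw [if_neg h1]
          constructor
          · exact Or.inl
          · rintro (hmem | ⟨m, hm1, hmle, hall, hx⟩)
            · exact hmem
            · obtain ⟨m', rfl⟩ : ∃ m', m = m' + 1 := ⟨m - 1, by omega⟩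
              rw [winOf_cons hkl m'] at hall
              rcases hall cs[kn] (List.mem_cons.mpr (Or.inl rfl)) with h | h
              · exact absurd h h0
              · exact absurd h h1
    · rw [dif_neg hks]
      constructor
      · exact Or.inl
      · rintro (hmem | ⟨m, hm1, hmle, hall, hx⟩)
        · exact hmem
        · omega

def AddedAt (cs : List Char) (maxlen : Int) (j : Nat) (x : Int) : Prop :=
  cs[j]? = some '1' ∧ ∃ L : Nat, 1 ≤ L ∧ (L : Int) ≤ maxlen ∧ j + L ≤ cs.length ∧
    AllBin (winOf cs j L) ∧ x = extBin 0 (winOf cs j L)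

theorem mem_step (cs : List Char) (maxlen : Int) (hml : 1 ≤ maxlen) (jn : Nat)
    (hj : jn < cs.length) (x : Int) (seen : PySem.Set Int) :
    (x ∈ (if PySem.List.pyGet? cs (jn : Int) == some '1' then
            bInner cs (min ((jn : Int) + maxlen) (cs.length : Int)) ((jn : Int) + 1) 1
              (PySem.Set.add seen 1)
          else seen)) ↔ x ∈ seen ∨ AddedAt cs maxlen jn x := by
  have hget : PySem.List.pyGet? cs (jn : Int) = some cs[jn] := by
    rw [PySem.List.pyGet?_natCast, List.getElem?_eq_getElem hj]
  simp only [hget]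
  by_cases h1 : cs[jn] = '1'
  · rw [if_pos (by simp [h1])]
    have hcast : ((jn + 1 : Nat) : Int) = (jn : Int) + 1 := by push_cast; ring
    rw [← hcast, mem_bInner cs _ (by omega) _ (jn + 1) 1 x _ rfl]
    constructor
    · rintro (hmem | ⟨m, hm1, hmle, hall, hx⟩)
      · rcases (PySem.Set.mem_add seen 1 x).mp hmem with hmem | rfl
        · exact Or.inl hmem
        · refine Or.inr ⟨by rw [List.getElem?_eq_getElem hj, h1], 1, le_rfl, hml, by omega, ?_, ?_⟩
          · rw [winOf_cons hj 0, h1]; rintro c hc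
            rcases List.mem_singleton.mp (by simpa [winOf] using hc) with rfl
            exact Or.inr rfl
          · rw [winOf_cons hj 0, h1]; simp [extBin, winOf]
      · refine Or.inr ⟨by rw [List.getElem?_eq_getElem hj, h1], m + 1, by omega, ?_, ?_, ?_, ?_⟩
        · push_cast at hmle ⊢; omega
        · push_cast at hmle ⊢; omega
        · rw [winOf_cons hj m, h1]
          rintro c hc
          rcases List.mem_cons.mp hc with rfl | hc
          · exact Or.inr rfl
          · exact hall c hc
        · rw [winOf_cons hj m, h1, extBin_cons, hx]; try (apply extBin_eq_of_v; simp)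
    · rintro (hmem | ⟨-, L, hL1, hLml, hLlen, hall, hx⟩)
      · exact Or.inl ((PySem.Set.mem_add seen 1 x).mpr (Or.inl hmem))
      · obtain ⟨m, rfl⟩ : ∃ m, L = m + 1 := ⟨L - 1, by omega⟩
        rw [winOf_cons hj m, h1] at hall hx
        by_cases hm0 : m = 0
        · subst hm0
          refine Or.inl ((PySem.Set.mem_add seen 1 x).mpr (Or.inr ?_))
          rw [hx]; simp [extBin, winOf]
        · refine Or.inr ⟨m, by omega, by push_cast at hLml hLlen ⊢; omega, ?_, ?_⟩
          · exact fun c hc => hall c (List.mem_cons.mpr (Or.inr hc))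
          · rw [hx, extBin_cons]; try (apply extBin_eq_of_v; simp)
  · rw [if_neg (by simp [h1])]
    constructor
    · exact Or.inl
    · rintro (hmem | ⟨hc1, -⟩)
      · exact hmem
      · rw [List.getElem?_eq_getElem hj] at hc1
        exact absurd (Option.some.inj hc1) h1

theorem mem_seenFold (cs : List Char) (maxlen : Int) (hml : 1 ≤ maxlen) (x : Int) :
    ∀ (js : List Int) (seen : PySem.Set Int), (∀ j ∈ js, 0 ≤ j ∧ j < (cs.length : Int)) →
    (x ∈ js.foldl
        (fun seen j =>
          if PySem.List.pyGet? cs j == some '1' then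
            bInner cs (min (j + maxlen) (cs.length : Int)) (j + 1) 1 (PySem.Set.add seen 1)
          else seen) seen ↔
      x ∈ seen ∨ ∃ j ∈ js, AddedAt cs maxlen j.toNat x) := by
  intro js
  induction js with
  | nil => intro seen _; simp
  | cons j t ih =>
    intro seen hb
    obtain ⟨hj0, hjl⟩ := hb j (List.mem_cons_self ..)
    obtain ⟨jn, rfl⟩ : ∃ jn : Nat, j = jn := ⟨j.toNat, by omega⟩
    rw [List.foldl_cons, ih _ (fun j hj => hb j (List.mem_cons.mpr (Or.inr hj))),
        mem_step cs maxlen hml jn (by omega) x seen]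
    constructor
    · rintro ((hmem | ha) | ⟨j', hj', ha⟩)
      · exact Or.inl hmem
      · exact Or.inr ⟨jn, List.mem_cons_self .., by simpa using ha⟩
      · exact Or.inr ⟨j', List.mem_cons.mpr (Or.inr hj'), ha⟩
    · rintro (hmem | ⟨j', hj', ha⟩)
      · exact Or.inl (Or.inl hmem)
      · rcases List.mem_cons.mp hj' with rfl | hj'
        · exact Or.inl (Or.inr (by simpa using ha))
        · exact Or.inr ⟨j', hj', ha⟩

theorem anyA_iff (cs : List Char) (i : Int) :
    ((PySem.List.pyRange 0 ((cs.length : Int) - ((binChars i).length : Int) + 1) 1).any fun j =>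
        PySem.List.slice cs (some j) (some (j + ((binChars i).length : Int))) == binChars i) = true ↔
      ∃ jn : Nat, jn + (binChars i).length ≤ cs.length ∧
        winOf cs jn (binChars i).length = binChars i := by
  rw [List.any_eq_true]
  constructor
  · rintro ⟨j, hj, hbeq⟩
    rw [PySem.List.mem_pyRange_one] at hj
    obtain ⟨jn, rfl⟩ : ∃ jn : Nat, j = jn := ⟨j.toNat, by omega⟩
    refine ⟨jn, by omega, ?_⟩
    rw [PySem.List.slice_natCast_add] at hbeq
    exact beq_iff_eq.mp hbeq
  · rintro ⟨jn, hle, hwin⟩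
    refine ⟨(jn : Int), PySem.List.mem_pyRange_one.mpr ⟨by omega, by omega⟩, ?_⟩
    rw [PySem.List.slice_natCast_add]
    exact beq_iff_eq.mpr hwin

theorem bridge (cs : List Char) (i n : Int) (hi : 1 ≤ i) (hin : i ≤ n) :
    ((∃ jn : Nat, jn + (binChars i).length ≤ cs.length ∧
        winOf cs jn (binChars i).length = binChars i) ↔
      ∃ jn : Nat, jn < cs.length ∧ AddedAt cs ((binChars n).length : Int) jn i) := by
  obtain ⟨t, ht, hall⟩ := binChars_shape hi
  have hL1 : 1 ≤ (binChars i).length := by rw [ht]; simp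
  constructor
  · rintro ⟨jn, hle, hwin⟩
    have hjl : jn < cs.length := by omega
    obtain ⟨L', hL'⟩ : ∃ L', (binChars i).length = L' + 1 := ⟨(binChars i).length - 1, by omega⟩
    have hwin' := hwin
    rw [hL', winOf_cons hjl L', ht] at hwin'
    have hc1 : cs[jn] = '1' := (List.cons_eq_cons.mp hwin').1
    refine ⟨jn, hjl, by rw [List.getElem?_eq_getElem hjl, hc1], (binChars i).length, hL1,
      by exact_mod_cast binChars_length_mono hi hin, hle, ?_, ?_⟩
    · rw [hwin]; exact hall
    · rw [hwin, extBin_binChars hi]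
  · rintro ⟨jn, hjl, hc1, L, hL1', hLml, hLlen, hallw, hx⟩
    obtain ⟨m, rfl⟩ : ∃ m, L = m + 1 := ⟨L - 1, by omega⟩
    have hwc := winOf_cons (cs := cs) (j := jn) hjl m
    rw [hwc] at hallw hx
    have hc1' : cs[jn] = '1' := by
      rw [List.getElem?_eq_getElem hjl] at hc1; exact Option.some.inj hc1
    rw [hc1'] at hallw hx
    have hrest : AllBin (winOf cs (jn + 1) m) :=
      fun c hc => hallw c (List.mem_cons.mpr (Or.inr hc))
    have hx1 : i = extBin 1 (winOf cs (jn + 1) m) := by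
      rw [hx, extBin_cons]; try (apply extBin_eq_of_v; simp)
    have hbc : binChars i = '1' :: winOf cs (jn + 1) m := by
      rw [hx1]; exact binChars_extBin hrest
    have hwin : winOf cs jn (m + 1) = binChars i := by rw [hwc, hc1', hbc]
    have hlen : (binChars i).length = m + 1 := by rw [← hwin]; exact length_winOf hLlen
    exact ⟨jn, by rw [hlen]; exact hLlen, by rw [hlen]; exact hwin⟩

theorem mem_seen_iff (cs : List Char) (n : Int) (hn : 1 ≤ n) (x : Int) :
    (x ∈ (PySem.List.pyRange 0 ((cs.length : Int)) 1).foldl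
        (fun seen j =>
          if PySem.List.pyGet? cs j == some '1' then
            bInner cs (min (j + ((binChars n).length : Int)) ((cs.length : Int))) (j + 1) 1
              (PySem.Set.add seen 1)
          else seen) ([] : PySem.Set Int)) ↔
      ∃ jn : Nat, jn < cs.length ∧ AddedAt cs ((binChars n).length : Int) jn x := by
  have hml : (1 : Int) ≤ ((binChars n).length : Int) := by
    obtain ⟨t, ht, -⟩ := binChars_shape hn
    rw [ht, List.length_cons]; push_cast; omega
  rw [mem_seenFold cs _ hml x _ []
    (fun j hj => by rw [PySem.List.mem_pyRange_one] at hj; exact ⟨hj.1, hj.2⟩)]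
  constructor
  · rintro (h | ⟨j, hj, ha⟩)
    · exact absurd h (List.not_mem_nil)
    · rw [PySem.List.mem_pyRange_one] at hj
      exact ⟨j.toNat, by omega, ha⟩
  · rintro ⟨jn, hjl, ha⟩
    exact Or.inr ⟨(jn : Int), PySem.List.mem_pyRange_one.mpr ⟨by omega, by omega⟩, by simpa using ha⟩

-- ===== VERDICT (by name: the statement is the Claim_ definition above) =====
theorem aLoop_eq (cs : List Char) (n : Int) :
    ∀ (fuel : Nat) (i : Int), (n + 1 - i).toNat = fuel →
    aLoop cs n i = (PySem.List.pyRange i (n + 1) 1).all fun i =>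
      (PySem.List.pyRange 0 ((cs.length : Int) - ((binChars i).length : Int) + 1) 1).any fun j =>
        PySem.List.slice cs (some j) (some (j + ((binChars i).length : Int))) == binChars i := by
  intro fuel
  induction fuel with
  | zero =>
    intro i h
    rw [aLoop, dif_neg (by omega), PySem.List.pyRange_one_eq_nil (by omega), List.all_nil]
  | succ f ih =>
    intro i h
    rw [aLoop]
    by_cases hi : i < n + 1
    · rw [dif_pos hi, PySem.List.pyRange_one_cons hi, List.all_cons, ih (i + 1) (by omega)]
      cases hany : ((PySem.List.pyRange 0 ((cs.length : Int) - ((binChars i).length : Int) + 1) 1).any fun j =>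
          PySem.List.slice cs (some j) (some (j + ((binChars i).length : Int))) == binChars i)
      · simp
      · simp
    · rw [dif_neg hi, PySem.List.pyRange_one_eq_nil (by omega), List.all_nil]

theorem bCheck_eq (seen : PySem.Set Int) (n : Int) :
    ∀ (fuel : Nat) (i : Int), (n + 1 - i).toNat = fuel →
    bCheck seen n i = (PySem.List.pyRange i (n + 1) 1).all fun i => PySem.Set.contains seen i := by
  intro fuel
  induction fuel with
  | zero =>
    intro i h
    rw [bCheck, dif_neg (by omega), PySem.List.pyRange_one_eq_nil (by omega), List.all_nil]
  | succ f ih =>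
    intro i h
    rw [bCheck]
    by_cases hi : i < n + 1
    · rw [dif_pos hi, PySem.List.pyRange_one_cons hi, List.all_cons, ih (i + 1) (by omega)]
      cases hc : PySem.Set.contains seen i
      · simp
      · simp
    · rw [dif_neg hi, PySem.List.pyRange_one_eq_nil (by omega), List.all_nil]

theorem solution_696_5_spec : Claim_equal_solution_696_5 := by
  intro s n _
  show solution_696_5 s n = solution_696_5_alt s n
  simp only [solution_696_5, solution_696_5_alt]
  rw [aLoop_eq s.toList n _ 1 rfl]
  by_cases hn : n ≤ 0
  · rw [if_pos hn, PySem.List.pyRange_one_eq_nil (by omega), List.all_nil]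
  · rw [if_neg hn]
    rw [bCheck_eq _ n _ 1 rfl]
    rw [Bool.eq_iff_iff, List.all_eq_true, List.all_eq_true]
    refine forall_congr' fun i => ?_
    refine imp_congr_right fun hmem => ?_
    have hi := PySem.List.mem_pyRange_one.mp hmem
    rw [anyA_iff, PySem.Set.contains_iff, bridge s.toList i n hi.1 (by omega)]
    exact (mem_seen_iff s.toList n (by omega) i).symm
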